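-- pv_equiv track=rewrite | github.com/vipinsaini27/DSAlgo | Day 13 - Introduction to Sorting/Stepwise Selection Sort!.py | solve
-- ===== SOURCE A (Python) =====
-- def solve(A):
--     ans = []
--     for i in range(len(A) - 1):
--         mn = A[i]
--         mn_idx = i
--         for j in range(i + 1, len(A)):
--             if A[j] < mn:
--                 mn = A[j]
--                 mn_idx = j
--
--         ans.append(mn_idx)
--         A[i], A[mn_idx] = A[mn_idx], A[i]
--
--     return ans
-- ===== SOURCE B (Python) =====
-- def solve(A):
--     # Alternative decomposition: repeatedly take min()/index() of the shrinking
--     # suffix, emit the absolute index, drop the head after moving it into the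
--     # min's slot.  Does not mutate the caller's list (A does).
--     xs = list(A)
--     ans = []
--     base = 0
--     while len(xs) > 1:
--         m = min(xs)
--         j = xs.index(m)
--         rest = xs[1:]
--         if j > 0:
--             rest[j - 1] = xs[0]
--         ans.append(base + j)
--         xs = rest
--         base += 1
--     return ans
-- ===== Notes on version B (the rewrite author's own statement) =====
-- stated objective: alternative
-- what changed: Nested index loops with in-place swaps are replaced by a loop over a shrinking suffix list that picks the leftmost minimum with library min()/index() and rebuilds the tail, never mutating the input.
import Mathlib
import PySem

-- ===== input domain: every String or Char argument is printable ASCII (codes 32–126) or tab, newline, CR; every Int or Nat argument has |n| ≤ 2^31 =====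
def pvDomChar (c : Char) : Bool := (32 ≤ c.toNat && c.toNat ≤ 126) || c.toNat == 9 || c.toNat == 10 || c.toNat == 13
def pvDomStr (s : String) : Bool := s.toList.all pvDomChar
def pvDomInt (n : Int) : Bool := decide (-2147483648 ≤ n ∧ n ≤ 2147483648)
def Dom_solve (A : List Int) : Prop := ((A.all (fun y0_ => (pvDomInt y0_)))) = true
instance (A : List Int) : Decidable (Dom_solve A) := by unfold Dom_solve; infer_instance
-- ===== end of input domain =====

-- B replaces A's nested index loops by a loop over a shrinking suffix using min()/index();
-- equivalence is about the RETURN value only: A sorts its argument in place, B does not mutate it.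

-- ===== PORT A =====
-- inner 'for j in range(i+1, len(A))' loop of A
def solveInner (xs : List Int) (i : Int) (mn : Int) : Int × Int :=
  (PySem.List.pyRange (i + 1) (xs.length : Int) 1).foldl
    (fun s j =>
      if PySem.List.pyGetD xs j 0 < s.1 then (PySem.List.pyGetD xs j 0, j) else s)
    (mn, i)

def solve (A : List Int) : List Int :=
  ((PySem.List.pyRange 0 ((A.length : Int) - 1) 1).foldl
    (fun (s : List Int × List Int) i =>
      let xs := s.2
      let mn := PySem.List.pyGetD xs i 0
      let p := solveInner xs i mn
      let mnIdx := p.2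
      let ai := PySem.List.pyGetD xs i 0
      let amn := PySem.List.pyGetD xs mnIdx 0
      (s.1 ++ [mnIdx], PySem.List.pySetD (PySem.List.pySetD xs i amn) mnIdx ai))
    ([], A)).1

-- ===== PORT B =====
-- B's 'while len(xs) > 1' loop as the obvious recursion on the shrinking list
def solveGo : List Int → Int → List Int
  | [], _ => []
  | [_], _ => []
  | x :: y :: t, base =>
    let m := (PySem.List.min? (x :: y :: t) (fun v => v)).getD 0
    let j := (PySem.List.index? (x :: y :: t) m).getD 0
    let rest := if 0 < j then (y :: t).set (j - 1) x else y :: t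
    (base + (j : Int)) :: solveGo rest (base + 1)
  termination_by xs _ => xs.length
  decreasing_by simp; split <;> simp

def solve_alt (A : List Int) : List Int := solveGo A 0

-- ===== PRECONDITION & SPEC =====
def Spec_solve (A : List Int) (out : List Int) : Prop := out = solve_alt A
instance (A : List Int) (out : List Int) : Decidable (Spec_solve A out) := by unfold Spec_solve; infer_instance

-- ===== CLAIM (what is proved, stated in full; the proofs are below) =====
def Claim_equal_solve : Prop := ∀ (A : List Int), Dom_solve A → Spec_solve A (solve A)

-- ===== LEMMAS AND PROOFS =====

-- abstract form of A's inner loop: scan t from position p keeping (min so far, its index)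
def selMin : List Int → Int × Int → Int → Int × Int
  | [], s, _ => s
  | a :: t, s, p => selMin t (if a < s.1 then (a, p) else s) (p + 1)

theorem foldl_min_le (t : List Int) (x : Int) : t.foldl min x ≤ x := by
  induction t generalizing x with
  | nil => simp
  | cons a t ih => exact le_trans (ih (min x a)) (min_le_left _ _)

theorem foldl_min_mem (t : List Int) (x : Int) : t.foldl min x = x ∨ t.foldl min x ∈ t := by
  induction t generalizing x with
  | nil => simp
  | cons a t ih =>
    simp only [List.foldl_cons]
    rcases ih (min x a) with h | h
    · rw [h]
      rcases le_total x a with hxa | hxa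
      · left; exact min_eq_left hxa
      · right; rw [min_eq_right hxa]; exact List.mem_cons_self
    · right; exact List.mem_cons_of_mem a h

theorem sel_char (t : List Int) : ∀ (x q p : Int),
    selMin t (x, q) p =
      if t.foldl min x < x
      then (t.foldl min x, p + (((PySem.List.index? t (t.foldl min x)).getD 0 : Nat) : Int))
      else (x, q) := by
  induction t with
  | nil => intro x q p; simp [selMin]
  | cons a t ih =>
    intro x q p
    simp only [selMin, List.foldl_cons]
    by_cases hax : a < x
    · rw [if_pos hax]
      rw [min_eq_right hax.le]
      rw [ih a p (p + 1)]
      by_cases hlt : t.foldl min a < a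
      · rw [if_pos hlt, if_pos (lt_trans hlt hax)]
        have hne : a ≠ t.foldl min a := (ne_of_gt hlt)
        rw [PySem.List.index?_cons_of_ne _ hne]
        obtain ⟨k, hk⟩ : ∃ k, PySem.List.index? t (t.foldl min a) = some k := by
          rw [Option.isSome_iff_exists.symm, PySem.List.index?_isSome_iff]
          rcases foldl_min_mem t a with h | h
          · omega
          · exact h
        rw [hk]
        simp only [Option.map_some, Option.getD_some, Prod.mk.injEq, true_and]
        push_cast; ring
      · rw [if_neg hlt]
        have heq : t.foldl min a = a := le_antisymm (foldl_min_le t a) (not_lt.mp hlt)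
        rw [heq, if_pos hax, PySem.List.index?_cons_self]
        simp
    · rw [if_neg hax]
      rw [min_eq_left (not_lt.mp hax)]
      rw [ih x q (p + 1)]
      by_cases hlt : t.foldl min x < x
      · rw [if_pos hlt, if_pos hlt]
        have hne : a ≠ t.foldl min x := by
          have := not_lt.mp hax; omega
        rw [PySem.List.index?_cons_of_ne _ hne]
        obtain ⟨k, hk⟩ : ∃ k, PySem.List.index? t (t.foldl min x) = some k := by
          rw [Option.isSome_iff_exists.symm, PySem.List.index?_isSome_iff]
          rcases foldl_min_mem t x with h | h
          · omega
          · exact h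
        rw [hk]
        simp only [Option.map_some, Option.getD_some, Prod.mk.injEq, true_and]
        push_cast; ring
      · rw [if_neg hlt, if_neg hlt]

-- A's inner fold over pyRange equals selMin on the suffix
theorem inner_fold (xs : List Int) : ∀ (suf pre : List Int), xs = pre ++ suf →
    ∀ (init : Int × Int),
    (PySem.List.pyRange (pre.length : Int) (xs.length : Int) 1).foldl
      (fun s j =>
        if PySem.List.pyGetD xs j 0 < s.1 then (PySem.List.pyGetD xs j 0, j) else s)
      init
    = selMin suf init (pre.length : Int) := by
  intro suf
  induction suf with
  | nil =>
    intro pre hxs init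
    subst hxs
    simp [PySem.List.pyRange_one_eq_nil, selMin]
  | cons a t ih =>
    intro pre hxs init
    have hlen : ((pre.length : Nat) : Int) < (xs.length : Int) := by
      subst hxs; simp
    rw [PySem.List.pyRange_one_cons hlen, List.foldl_cons]
    have hget : PySem.List.pyGetD xs ((pre.length : Nat) : Int) 0 = a := by
      subst hxs
      simp [List.getD_eq_getElem?_getD]
    have h2 : xs = (pre ++ [a]) ++ t := by simp [hxs]
    have hih := ih (pre ++ [a]) h2 (if a < init.1 then (a, ((pre.length : Nat) : Int)) else init)
    simp only [List.length_append, List.length_cons, List.length_nil] at hih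
    push_cast at hih ⊢
    simp only [hget, selMin]
    convert hih using 2

-- writing at position pre.length replaces the head of the suffix
theorem set_append_cons (pre l : List Int) (x v : Int) :
    (pre ++ x :: l).set pre.length v = pre ++ v :: l := by
  induction pre with
  | nil => simp
  | cons p pre ih => simp [List.set, ih]

-- writing past the head lands inside the tail
theorem set_append_cons_add (pre l : List Int) (x v : Int) (k : Nat) :
    (pre ++ x :: l).set (pre.length + (k + 1)) v = pre ++ x :: l.set k v := by
  induction pre with
  | nil => simp
  | cons p pre ih =>
    have harith : (p :: pre).length + (k + 1) = (pre.length + (k + 1)) + 1 := by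
      simp; omega
    rw [harith]
    simp [List.set, ih]

-- reading past the head lands inside the tail
theorem getD_append_cons_add (pre l : List Int) (x d : Int) (k : Nat) :
    (pre ++ x :: l).getD (pre.length + (k + 1)) d = l.getD k d := by
  induction pre with
  | nil => simp
  | cons p pre ih =>
    have harith : (p :: pre).length + (k + 1) = (pre.length + (k + 1)) + 1 := by
      simp; omega
    rw [harith]
    simpa using ih

-- the swap keeps the prefix in place and moves the head into the min's slot
theorem set_swap (pre rest0 : List Int) (x m : Int) (jt : Nat) :
    ((pre ++ x :: rest0).set pre.length m).set (pre.length + (jt + 1)) x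
      = pre ++ m :: rest0.set jt x := by
  rw [set_append_cons, set_append_cons_add]

theorem outer (suf pre acc : List Int) :
    ((PySem.List.pyRange (pre.length : Int) ((pre.length : Int) + (suf.length : Int) - 1) 1).foldl
      (fun (s : List Int × List Int) i =>
        let xs := s.2
        let mn := PySem.List.pyGetD xs i 0
        let p := solveInner xs i mn
        let mnIdx := p.2
        let ai := PySem.List.pyGetD xs i 0
        let amn := PySem.List.pyGetD xs mnIdx 0
        (s.1 ++ [mnIdx], PySem.List.pySetD (PySem.List.pySetD xs i amn) mnIdx ai))
      (acc, pre ++ suf)).1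
    = acc ++ solveGo suf (pre.length : Int) := by
  induction hn : suf.length generalizing suf pre acc with
  | zero =>
    rcases List.length_eq_zero_iff.mp hn with rfl
    rw [PySem.List.pyRange_one_eq_nil (by push_cast; omega)]
    simp [solveGo]
  | succ n ihn =>
    cases suf with
    | nil => simp at hn
    | cons x rest0 =>
      cases rest0 with
      | nil =>
        rw [PySem.List.pyRange_one_eq_nil (by simp at hn ⊢; omega)]
        simp [solveGo]
      | cons y t =>
        have hlen0 : (y :: t).length = n := by simpa using hn
        have hbound : ((pre.length : Nat) : Int) < (pre.length : Int) + ((n + 1 : Nat) : Int) - 1 := by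
          simp at hn; push_cast; omega
        rw [PySem.List.pyRange_one_cons hbound, List.foldl_cons]
        have hget : PySem.List.pyGetD (pre ++ x :: y :: t) ((pre.length : Nat) : Int) 0 = x := by
          simp [List.getD_eq_getElem?_getD]
        have hinner_raw : solveInner (pre ++ x :: y :: t) ((pre.length : Nat) : Int) x
            = selMin (y :: t) (x, ((pre.length : Nat) : Int)) ((pre.length : Int) + 1) := by
          have := inner_fold (pre ++ x :: y :: t) (y :: t) (pre ++ [x]) (by simp)
            (x, ((pre.length : Nat) : Int))
          simp only [List.length_append, List.length_cons, List.length_nil] at this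
          push_cast at this ⊢
          simpa [solveInner] using this
        have hsel := sel_char (y :: t) x ((pre.length : Nat) : Int) ((pre.length : Int) + 1)
        by_cases hlt : (y :: t).foldl min x < x
        · -- the minimum lies strictly inside the tail
          obtain ⟨jt, hjt⟩ : ∃ jt, PySem.List.index? (y :: t) ((y :: t).foldl min x) = some jt := by
            rw [← Option.isSome_iff_exists, PySem.List.index?_isSome_iff]
            rcases foldl_min_mem (y :: t) x with h | h
            · omega
            · exact h
          obtain ⟨hklen, hkval, -⟩ := PySem.List.getElem_of_index?_eq_some hjt
          have hinner : solveInner (pre ++ x :: y :: t) ((pre.length : Nat) : Int) x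
              = ((y :: t).foldl min x, (pre.length : Int) + 1 + (jt : Int)) := by
            rw [hinner_raw, hsel, if_pos hlt, hjt]; simp
          have hcast : ((pre.length : Int) + 1 + (jt : Int)) = ((pre.length + (jt + 1) : Nat) : Int) := by
            push_cast; ring
          have hamn : PySem.List.pyGetD (pre ++ x :: y :: t) ((pre.length + (jt + 1) : Nat) : Int) 0
              = (y :: t).foldl min x := by
            rw [PySem.List.pyGetD_natCast, getD_append_cons_add]
            simp [List.getD_eq_getElem?_getD, List.getElem?_eq_getElem hklen, hkval]
          have hb : solveGo (x :: y :: t) (pre.length : Int)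
              = ((pre.length : Int) + 1 + (jt : Int)) :: solveGo ((y :: t).set jt x) ((pre.length : Int) + 1) := by
            rw [solveGo.eq_3]
            rw [PySem.List.min?_id_cons]
            simp only [Option.getD_some]
            rw [PySem.List.index?_cons_of_ne _ (ne_of_gt hlt), hjt]
            simp only [Option.map_some, Option.getD_some]
            rw [if_pos (by omega : 0 < jt + 1)]
            simp only [Nat.add_sub_cancel]
            push_cast; ring_nf
          have hih := ihn ((y :: t).set jt x) (pre ++ [(y :: t).foldl min x])
            (acc ++ [(pre.length : Int) + 1 + (jt : Int)]) (by simp [hlen0])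
          simp only [hget, hinner, hcast, PySem.List.pySetD_natCast, hamn]
          rw [← hcast] at hamn ⊢
          rw [hcast, set_swap]
          simp only [List.length_append, List.length_cons, List.length_nil] at hih
          push_cast at hih ⊢
          rw [hb]
          rw [show (acc ++ [(pre.length : Int) + 1 + (jt : Int)]) ++ solveGo ((y :: t).set jt x) ((pre.length : Int) + 1)
              = acc ++ (((pre.length : Int) + 1 + (jt : Int)) :: solveGo ((y :: t).set jt x) ((pre.length : Int) + 1)) by
            simp] at hih
          convert hih using 3
          all_goals try (push_cast; ring)
          all_goals simp
        · -- the head is already the minimum: the swap is a no-op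
          have heq : (y :: t).foldl min x = x :=
            le_antisymm (foldl_min_le (y :: t) x) (not_lt.mp hlt)
          have hinner : solveInner (pre ++ x :: y :: t) ((pre.length : Nat) : Int) x
              = (x, ((pre.length : Nat) : Int)) := by
            rw [hinner_raw, hsel, if_neg hlt]
          have hb : solveGo (x :: y :: t) (pre.length : Int)
              = ((pre.length : Int)) :: solveGo (y :: t) ((pre.length : Int) + 1) := by
            rw [solveGo.eq_3]
            rw [PySem.List.min?_id_cons]
            simp only [Option.getD_some, heq]
            rw [PySem.List.index?_cons_self]
            simp
          have hih := ihn (y :: t) (pre ++ [x]) (acc ++ [((pre.length : Nat) : Int)]) hlen0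
          simp only [hget, hinner, PySem.List.pySetD_natCast, set_append_cons]
          simp only [List.length_append, List.length_cons, List.length_nil] at hih
          push_cast at hih ⊢
          rw [hb]
          rw [show (acc ++ [((pre.length : Nat) : Int)]) ++ solveGo (y :: t) ((pre.length : Int) + 1)
              = acc ++ (((pre.length : Nat) : Int) :: solveGo (y :: t) ((pre.length : Int) + 1)) by simp] at hih
          convert hih using 3
          all_goals try (push_cast; ring)
          all_goals simp

-- ===== VERDICT (by name: the statement is the Claim_ definition above) =====
theorem solve_spec : Claim_equal_solve := by
  intro A _
  show solve A = solve_alt A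
  have h := outer A [] []
  simpa [solve, solve_alt] using h
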